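-- pv_equiv track=rewrite | github.com/RorroS/advent-of-code | 2019/python/10.py | in_sight
-- ===== SOURCE A (Python) =====
-- import math
--
-- def x(pos):
--     return pos[0]
--
-- def y(pos):
--     return pos[1]
--
-- def in_sight(grid, source, destination):
--     dx = x(destination) - x(source)
--     dy = y(destination) - y(source)
--     x_step, y_step = 0, 0
--     gcd = abs(math.gcd(dy, dx))
--
--     if dy == 0:
--         x_step = dx // abs(dx)
--         n = abs(dx)
--     elif dx == 0:
--         y_step = dy // abs(dy)
--         n = abs(dy)
--     else:
--         y_step = dy // gcd
--         x_step = dx // gcd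
--         n = gcd
--
--     for i in range(1, n):
--         new_pos = (x(source) + x_step*i, y(source) + y_step*i)
--         if grid[new_pos]:
--           return False
--     return True
-- ===== SOURCE B (Python) =====
-- def in_sight(grid, source, destination):
--     sx, sy = source
--     dx = destination[0] - sx
--     dy = destination[1] - sy
--     dd = dx * dx + dy * dy
--     return not any(
--         occ
--         and dx * (py - sy) == dy * (px - sx)
--         and 0 < dx * (px - sx) + dy * (py - sy) < dd
--         for (px, py), occ in grid.items()
--     )
-- ===== Notes on version B (the rewrite author's own statement) =====
-- stated objective: alternative
-- what changed: A reduces (dx,dy) by their gcd and walks every lattice point between source and destination, doing a dictionary lookup per step; B instead makes a single pass over the grid's entries and tests each occupied point for collinearity (cross product = 0) and strict betweenness (0 < dot < |d-s|^2), with no gcd, no step walk and no lookups.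
import Mathlib
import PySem

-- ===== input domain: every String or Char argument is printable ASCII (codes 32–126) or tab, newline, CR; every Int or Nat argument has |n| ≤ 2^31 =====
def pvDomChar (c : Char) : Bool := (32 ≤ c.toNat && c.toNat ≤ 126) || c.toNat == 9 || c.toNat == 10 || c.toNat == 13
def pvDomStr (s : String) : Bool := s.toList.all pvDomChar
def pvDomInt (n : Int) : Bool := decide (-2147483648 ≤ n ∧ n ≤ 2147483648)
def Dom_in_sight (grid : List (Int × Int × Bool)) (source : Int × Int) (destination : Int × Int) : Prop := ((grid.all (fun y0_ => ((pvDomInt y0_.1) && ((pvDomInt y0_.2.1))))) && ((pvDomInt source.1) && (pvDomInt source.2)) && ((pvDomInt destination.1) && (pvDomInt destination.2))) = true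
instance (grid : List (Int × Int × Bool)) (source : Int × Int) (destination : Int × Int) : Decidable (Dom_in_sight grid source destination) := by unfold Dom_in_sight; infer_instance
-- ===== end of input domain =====

-- B replaces A's walk along the reduced lattice step (with a dict lookup per step) by a single
-- scan of the grid's entries testing collinearity (cross product) and strict betweenness (dot
-- products); objective: alternative single-pass formulation, no per-step dictionary lookups.


-- ===== PORT A =====
-- first-match lookup in the association list representing the Python dict;
-- Python raises KeyError on a missing key, so `none` is the KeyError case (excluded by Pre_)
def pvLookup (grid : List (Int × Int × Bool)) (p : Int × Int) : Option Bool :=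
  match grid with
  | [] => none
  | (x, y, b) :: rest => if (x, y) = p then some b else pvLookup rest p

-- the `for i in range(1, n)` loop with its early `return False`; `grid[new_pos]` is
-- `(pvLookup …).getD false` — the `none`/KeyError case never occurs under Pre_
def inSightLoop (grid : List (Int × Int × Bool)) (sx sy x_step y_step : Int) :
    List Int → Bool
  | [] => true
  | i :: rest =>
    if (pvLookup grid (sx + x_step * i, sy + y_step * i)).getD false then false
    else inSightLoop grid sx sy x_step y_step rest

def in_sight (grid : List (Int × Int × Bool)) (source : Int × Int) (destination : Int × Int) : Bool :=
  let dx := destination.1 - source.1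
  let dy := destination.2 - source.2
  let gcd : Int := |((Int.gcd dy dx : Nat) : Int)|
  -- the three branches; x_step/y_step start at 0 and are reassigned exactly as in the Python.
  -- dx // abs(dx) with dx = 0 is Python's ZeroDivisionError, excluded by Pre_
  let st :=
    if dy = 0 then (PySem.Int.floordiv dx |dx|, 0, |dx|)
    else if dx = 0 then ((0 : Int), PySem.Int.floordiv dy |dy|, |dy|)
    else (PySem.Int.floordiv dx gcd, PySem.Int.floordiv dy gcd, gcd)
  inSightLoop grid source.1 source.2 st.1 st.2.1 (PySem.List.pyRange 1 st.2.2 1)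

-- ===== PORT B =====
def in_sight_alt (grid : List (Int × Int × Bool)) (source : Int × Int) (destination : Int × Int) : Bool :=
  let sx := source.1
  let sy := source.2
  let dx := destination.1 - sx
  let dy := destination.2 - sy
  let dd := dx * dx + dy * dy
  !(grid.any (fun e =>
      e.2.2 && (dx * (e.2.1 - sy) == dy * (e.1 - sx)) &&
      decide (0 < dx * (e.1 - sx) + dy * (e.2.1 - sy)) &&
      decide (dx * (e.1 - sx) + dy * (e.2.1 - sy) < dd)))

-- ===== PRECONDITION & SPEC =====
-- Pre_ excludes exactly the inputs where A raises: source = destination (ZeroDivisionError) and a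
-- grid missing some lattice point strictly between source and destination (KeyError); it also
-- excludes association lists with duplicate keys, which cannot arise from a Python dict.
def Pre_in_sight (grid : List (Int × Int × Bool)) (source : Int × Int) (destination : Int × Int) : Prop :=
  let dx := destination.1 - source.1
  let dy := destination.2 - source.2
  let G : Int := (Int.gcd dy dx : Nat)
  ¬(dx = 0 ∧ dy = 0)
  ∧ (grid.map (fun e => (e.1, e.2.1))).Nodup
  ∧ ∀ i ∈ PySem.List.pyRange 1 G 1,
      (source.1 + dx / G * i, source.2 + dy / G * i) ∈ grid.map (fun e => (e.1, e.2.1))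
instance (grid : List (Int × Int × Bool)) (source : Int × Int) (destination : Int × Int) : Decidable (Pre_in_sight grid source destination) := by unfold Pre_in_sight; infer_instance

def pvWitness_in_sight : (List (Int × Int × Bool)) × (Int × Int) × (Int × Int) :=
  ([(1, 0, false), (3, 1, true)], (0, 0), (2, 0))

def Spec_in_sight (grid : List (Int × Int × Bool)) (source : Int × Int) (destination : Int × Int) (out : Bool) : Prop := out = in_sight_alt grid source destination
instance (grid : List (Int × Int × Bool)) (source : Int × Int) (destination : Int × Int) (out : Bool) : Decidable (Spec_in_sight grid source destination out) := by unfold Spec_in_sight; infer_instance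

-- ===== CLAIM (what is proved, stated in full; the proofs are below) =====
def Claim_equal_in_sight : Prop := ∀ (grid : List (Int × Int × Bool)) (source : Int × Int) (destination : Int × Int), Dom_in_sight grid source destination → Pre_in_sight grid source destination → Spec_in_sight grid source destination (in_sight grid source destination)

-- ===== LEMMAS AND PROOFS =====

-- loop = true  iff  no visited lattice point holds a truthy asteroid
theorem inSightLoop_eq_true_iff (grid : List (Int × Int × Bool)) (sx sy xs ys : Int)
    (l : List Int) :
    inSightLoop grid sx sy xs ys l = true ↔
      ∀ i ∈ l, (pvLookup grid (sx + xs * i, sy + ys * i)).getD false = false := by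
  induction l with
  | nil => simp [inSightLoop]
  | cons j rest ih =>
    simp only [inSightLoop]
    by_cases h : (pvLookup grid (sx + xs * j, sy + ys * j)).getD false = true
    · simp [h]
    · simp only [Bool.not_eq_true] at h
      simp [h, ih]

theorem pvLookup_mem {grid : List (Int × Int × Bool)} {p : Int × Int} {c : Bool}
    (h : pvLookup grid p = some c) : ∃ e ∈ grid, (e.1, e.2.1) = p ∧ e.2.2 = c := by
  induction grid with
  | nil => simp [pvLookup] at h
  | cons hd tl ih =>
    obtain ⟨x, y, b⟩ := hd
    by_cases hxy : ((x, y) : Int × Int) = p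
    · simp [pvLookup, hxy] at h
      exact ⟨(x, y, b), by simp, by simpa using hxy, by simpa using h⟩
    · simp only [pvLookup, if_neg hxy] at h
      obtain ⟨e, he, hk, hv⟩ := ih h
      exact ⟨e, by simp [he], hk, hv⟩

theorem pvLookup_of_mem {grid : List (Int × Int × Bool)}
    (hnd : (grid.map (fun e => (e.1, e.2.1))).Nodup) {e : Int × Int × Bool} (he : e ∈ grid) :
    pvLookup grid (e.1, e.2.1) = some e.2.2 := by
  induction grid with
  | nil => simp at he
  | cons hd tl ih =>
    obtain ⟨x, y, b⟩ := hd
    simp only [List.map_cons, List.nodup_cons] at hnd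
    rcases List.mem_cons.mp he with rfl | htl
    · simp [pvLookup]
    · have hne : ((x, y) : Int × Int) ≠ (e.1, e.2.1) := by
        intro hcontra
        exact hnd.1 (by
          refine List.mem_map.mpr ⟨e, htl, ?_⟩
          exact hcontra.symm)
      simp only [pvLookup, if_neg hne]
      exact ih hnd.2 htl

-- forward parametrisation: a collinear strictly-between lattice point is a positive
-- multiple of the primitive step
theorem between_param (G a b u v : Int) (hG : 0 < G) (hcop : Int.gcd a b = 1)
    (hc : (G * a) * v = (G * b) * u)
    (h1 : 0 < (G * a) * u + (G * b) * v)
    (h2 : (G * a) * u + (G * b) * v < (G * a) * (G * a) + (G * b) * (G * b)) :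
    ∃ i : Int, 1 ≤ i ∧ i < G ∧ u = a * i ∧ v = b * i := by
  have hab : ¬(a = 0 ∧ b = 0) := by
    rintro ⟨rfl, rfl⟩; simp at hcop
  have hc' : a * v = b * u := by
    have h : G * (a * v) = G * (b * u) := by
      rw [← mul_assoc, ← mul_assoc]; exact hc
    exact mul_left_cancel₀ (ne_of_gt hG) h
  have hs : 0 < a * a + b * b := by
    rcases not_and_or.mp hab with ha | hb
    · nlinarith [mul_self_pos.mpr ha, mul_self_nonneg b]
    · nlinarith [mul_self_pos.mpr hb, mul_self_nonneg a]
  have hpos : 0 < G * (a * a + b * b) := mul_pos hG hs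
  obtain ⟨k, hu, hv⟩ : ∃ k : Int, u = a * k ∧ v = b * k := by
    by_cases ha : a = 0
    · have hb : b = 1 ∨ b = -1 := by
        subst ha
        have h : b.natAbs = 1 := by simpa [Int.gcd] using hcop
        omega
      have hu0 : u = 0 := by
        have hbne : b ≠ 0 := by rcases hb with rfl | rfl <;> norm_num
        have h : b * u = 0 := by rw [← hc', ha]; ring
        exact (mul_eq_zero.mp h).resolve_left hbne
      refine ⟨b * v, by simp [hu0, ha], ?_⟩
      rcases hb with rfl | rfl <;> ring
    · have hdvd : a ∣ u := by
        have h : a ∣ b * u := ⟨v, hc'.symm⟩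
        exact (Int.isCoprime_iff_gcd_eq_one.mpr hcop).dvd_of_dvd_mul_left h
      obtain ⟨k, hk⟩ := hdvd
      refine ⟨k, hk, ?_⟩
      have h : a * v = a * (b * k) := by rw [hc', hk]; ring
      exact mul_left_cancel₀ ha h
  have hdot : (G * a) * u + (G * b) * v = G * (a * a + b * b) * k := by
    rw [hu, hv]; ring
  have hdd : (G * a) * (G * a) + (G * b) * (G * b) = G * (a * a + b * b) * G := by ring
  rw [hdot] at h1
  rw [hdot, hdd] at h2
  have hk1 : 1 ≤ k := by
    by_contra hcon
    push Not at hcon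
    have h : G * (a * a + b * b) * k ≤ 0 :=
      mul_nonpos_of_nonneg_of_nonpos (le_of_lt hpos) (by omega)
    linarith
  have hkG : k < G := by
    by_contra hcon
    push Not at hcon
    have h : G * (a * a + b * b) * G ≤ G * (a * a + b * b) * k :=
      mul_le_mul_of_nonneg_left hcon (le_of_lt hpos)
    linarith
  exact ⟨k, hk1, hkG, hu, hv⟩

-- reverse parametrisation: every step of A's walk is collinear and strictly between
theorem param_between (G a b i : Int) (hG : 0 < G) (hab : ¬(a = 0 ∧ b = 0))
    (hi1 : 1 ≤ i) (hiG : i < G) :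
    (G * a) * (b * i) = (G * b) * (a * i) ∧
    0 < (G * a) * (a * i) + (G * b) * (b * i) ∧
    (G * a) * (a * i) + (G * b) * (b * i) < (G * a) * (G * a) + (G * b) * (G * b) := by
  have hs : 0 < a * a + b * b := by
    rcases not_and_or.mp hab with ha | hb
    · nlinarith [mul_self_pos.mpr ha, mul_self_nonneg b]
    · nlinarith [mul_self_pos.mpr hb, mul_self_nonneg a]
  have hpos : 0 < G * (a * a + b * b) := mul_pos hG hs
  have e1 : (G * a) * (a * i) + (G * b) * (b * i) = G * (a * a + b * b) * i := by ring
  have e2 : (G * a) * (G * a) + (G * b) * (G * b) = G * (a * a + b * b) * G := by ring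
  refine ⟨by ring, ?_, ?_⟩
  · rw [e1]; exact mul_pos hpos (by omega)
  · rw [e1, e2]; exact mul_lt_mul_of_pos_left hiG hpos

-- branch normalisation: all three branches of A compute the primitive step (dx/G, dy/G)
-- and walk range(1, G)
theorem in_sight_eq_loop (grid : List (Int × Int × Bool)) (source destination : Int × Int)
    (h0 : ¬((destination.1 - source.1) = 0 ∧ (destination.2 - source.2) = 0)) :
    in_sight grid source destination =
      inSightLoop grid source.1 source.2 ((destination.1 - source.1) / ((Int.gcd (destination.2 - source.2) (destination.1 - source.1) : Nat) : Int)) ((destination.2 - source.2) / ((Int.gcd (destination.2 - source.2) (destination.1 - source.1) : Nat) : Int)) (PySem.List.pyRange 1 ((Int.gcd (destination.2 - source.2) (destination.1 - source.1) : Nat) : Int) 1) := by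
  simp only [in_sight]
  split_ifs with hy hx
  · -- dy = 0, dx ≠ 0
    have hx : (destination.1 - source.1) ≠ 0 := fun hc => h0 ⟨hc, hy⟩
    have e3 : |(destination.1 - source.1)| = ((Int.gcd (destination.2 - source.2) (destination.1 - source.1) : Nat) : Int) := by
      rw [hy, Int.gcd_zero_left]; exact Int.abs_eq_natAbs _
    rw [PySem.Int.floordiv_eq_ediv_of_pos (abs_pos.mpr hx)]
    rw [e3, hy]
    norm_num
  · -- dx = 0, dy ≠ 0
    have e3 : |(destination.2 - source.2)| = ((Int.gcd (destination.2 - source.2) (destination.1 - source.1) : Nat) : Int) := by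
      rw [hx, Int.gcd_zero_right]; exact Int.abs_eq_natAbs _
    rw [PySem.Int.floordiv_eq_ediv_of_pos (abs_pos.mpr hy)]
    rw [e3, hx]
    norm_num
  · -- dx ≠ 0, dy ≠ 0
    have hGpos : (0:Int) < ((Int.gcd (destination.2 - source.2) (destination.1 - source.1) : Nat) : Int) := by
      have h : Int.gcd (destination.2 - source.2) (destination.1 - source.1) ≠ 0 := fun hc => hy (Int.gcd_eq_zero_iff.mp hc).1
      exact_mod_cast Nat.pos_of_ne_zero h
    have habs : |((Int.gcd (destination.2 - source.2) (destination.1 - source.1) : Nat) : Int)| = ((Int.gcd (destination.2 - source.2) (destination.1 - source.1) : Nat) : Int) := abs_of_pos hGpos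
    rw [habs, PySem.Int.floordiv_eq_ediv_of_pos hGpos, PySem.Int.floordiv_eq_ediv_of_pos hGpos]

-- B = true  iff  no occupied grid entry is collinear and strictly between
theorem in_sight_alt_eq_true_iff (grid : List (Int × Int × Bool)) (source destination : Int × Int) :
    in_sight_alt grid source destination = true ↔
      ∀ e ∈ grid,
        (e.2.2 && ((destination.1 - source.1) * (e.2.1 - source.2) == (destination.2 - source.2) * (e.1 - source.1)) &&
         decide (0 < (destination.1 - source.1) * (e.1 - source.1) + (destination.2 - source.2) * (e.2.1 - source.2)) &&
         decide ((destination.1 - source.1) * (e.1 - source.1) + (destination.2 - source.2) * (e.2.1 - source.2) < (destination.1 - source.1) * (destination.1 - source.1) + (destination.2 - source.2) * (destination.2 - source.2))) = false := by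
  simp only [in_sight_alt, Bool.not_eq_eq_eq_not, Bool.not_true, List.any_eq_false, Bool.not_eq_true]

-- ===== VERDICT (by name: the statement is the Claim_ definition above) =====
theorem in_sight_spec : Claim_equal_in_sight := by
  intro grid source destination _ hpre
  unfold Spec_in_sight
  simp only [Pre_in_sight] at hpre
  obtain ⟨h0, hnd, hcov⟩ := hpre
  have hGpos : (0:Int) < ((Int.gcd (destination.2 - source.2) (destination.1 - source.1) : Nat) : Int) := by
    have h : Int.gcd (destination.2 - source.2) (destination.1 - source.1) ≠ 0 := by
      intro hc
      rcases Int.gcd_eq_zero_iff.mp hc with ⟨h1, h2⟩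
      exact h0 ⟨h2, h1⟩
    exact_mod_cast Nat.pos_of_ne_zero h
  have hxa : ((Int.gcd (destination.2 - source.2) (destination.1 - source.1) : Nat) : Int) * ((destination.1 - source.1) / ((Int.gcd (destination.2 - source.2) (destination.1 - source.1) : Nat) : Int)) = (destination.1 - source.1) := Int.mul_ediv_cancel' (Int.gcd_dvd_right _ _)
  have hyb : ((Int.gcd (destination.2 - source.2) (destination.1 - source.1) : Nat) : Int) * ((destination.2 - source.2) / ((Int.gcd (destination.2 - source.2) (destination.1 - source.1) : Nat) : Int)) = (destination.2 - source.2) := Int.mul_ediv_cancel' (Int.gcd_dvd_left _ _)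
  have hcop : Int.gcd ((destination.1 - source.1) / ((Int.gcd (destination.2 - source.2) (destination.1 - source.1) : Nat) : Int)) ((destination.2 - source.2) / ((Int.gcd (destination.2 - source.2) (destination.1 - source.1) : Nat) : Int)) = 1 := by
    rw [Int.gcd_comm]
    exact Int.gcd_div_gcd_div_gcd (by exact_mod_cast hGpos)
  have hab0 : ¬(((destination.1 - source.1) / ((Int.gcd (destination.2 - source.2) (destination.1 - source.1) : Nat) : Int)) = 0 ∧ ((destination.2 - source.2) / ((Int.gcd (destination.2 - source.2) (destination.1 - source.1) : Nat) : Int)) = 0) := by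
    rintro ⟨ha, hb⟩
    exact h0 ⟨by rw [← hxa, ha, mul_zero], by rw [← hyb, hb, mul_zero]⟩
  rw [in_sight_eq_loop grid source destination h0]
  rw [Bool.eq_iff_iff, inSightLoop_eq_true_iff, in_sight_alt_eq_true_iff]
  constructor
  · -- loop clean → no entry blocks
    intro hloop e he
    by_contra hpred
    simp only [Bool.not_eq_false, Bool.and_eq_true, beq_iff_eq, decide_eq_true_eq] at hpred
    obtain ⟨⟨⟨hocc, hcross⟩, hdot1⟩, hdot2⟩ := hpred
    obtain ⟨i, hi1, hiG, hu, hv⟩ := between_param ((Int.gcd (destination.2 - source.2) (destination.1 - source.1) : Nat) : Int) ((destination.1 - source.1) / ((Int.gcd (destination.2 - source.2) (destination.1 - source.1) : Nat) : Int)) ((destination.2 - source.2) / ((Int.gcd (destination.2 - source.2) (destination.1 - source.1) : Nat) : Int)) (e.1 - source.1) (e.2.1 - source.2)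
      hGpos hcop (by rw [hxa, hyb]; exact hcross)
      (by rw [hxa, hyb]; exact hdot1)
      (by rw [hxa, hyb]; exact hdot2)
    have hmem : i ∈ PySem.List.pyRange 1 ((Int.gcd (destination.2 - source.2) (destination.1 - source.1) : Nat) : Int) 1 := by
      rw [PySem.List.mem_pyRange_one]; exact ⟨hi1, hiG⟩
    have hres := hloop i hmem
    have hkey : (source.1 + ((destination.1 - source.1) / ((Int.gcd (destination.2 - source.2) (destination.1 - source.1) : Nat) : Int)) * i, source.2 + ((destination.2 - source.2) / ((Int.gcd (destination.2 - source.2) (destination.1 - source.1) : Nat) : Int)) * i) = (e.1, e.2.1) := by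
      have h1 : e.1 = source.1 + ((destination.1 - source.1) / ((Int.gcd (destination.2 - source.2) (destination.1 - source.1) : Nat) : Int)) * i := by omega
      have h2 : e.2.1 = source.2 + ((destination.2 - source.2) / ((Int.gcd (destination.2 - source.2) (destination.1 - source.1) : Nat) : Int)) * i := by omega
      simp [h1, h2]
    rw [hkey, pvLookup_of_mem hnd he, hocc] at hres
    simp at hres
  · -- no entry blocks → loop clean
    intro hnone i hi
    have hi' := PySem.List.mem_pyRange_one.mp hi
    cases hlk : pvLookup grid (source.1 + ((destination.1 - source.1) / ((Int.gcd (destination.2 - source.2) (destination.1 - source.1) : Nat) : Int)) * i, source.2 + ((destination.2 - source.2) / ((Int.gcd (destination.2 - source.2) (destination.1 - source.1) : Nat) : Int)) * i) with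
    | none => simp
    | some c =>
      obtain ⟨e, he, hk, hv⟩ := pvLookup_mem hlk
      have hfalse := hnone e he
      obtain ⟨hcross, hdot1, hdot2⟩ := param_between ((Int.gcd (destination.2 - source.2) (destination.1 - source.1) : Nat) : Int) ((destination.1 - source.1) / ((Int.gcd (destination.2 - source.2) (destination.1 - source.1) : Nat) : Int)) ((destination.2 - source.2) / ((Int.gcd (destination.2 - source.2) (destination.1 - source.1) : Nat) : Int)) i hGpos hab0 hi'.1 hi'.2
      rw [hxa, hyb] at hcross hdot1 hdot2
      have hu : e.1 - source.1 = ((destination.1 - source.1) / ((Int.gcd (destination.2 - source.2) (destination.1 - source.1) : Nat) : Int)) * i := by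
        have h := congrArg Prod.fst hk
        omega
      have hvv : e.2.1 - source.2 = ((destination.2 - source.2) / ((Int.gcd (destination.2 - source.2) (destination.1 - source.1) : Nat) : Int)) * i := by
        have h := congrArg Prod.snd hk
        simp only [] at h
        omega
      simp only [Bool.and_eq_false_iff, beq_eq_false_iff_ne, ne_eq,
        decide_eq_false_iff_not, not_lt] at hfalse
      rcases hfalse with ((hocc | hcr) | hd1) | hd2
      · rw [hv] at hocc; simp [hocc]
      · exact absurd (by rw [hu, hvv]; exact hcross) hcr
      · exfalso
        rw [hu, hvv] at hd1
        linarith [hdot1]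
      · exfalso
        rw [hu, hvv] at hd2
        linarith [hdot2]
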